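-- pv_equiv track=rewrite | github.com/RishiHazra/saycanpay | planLM/data_utils.py | process_action
-- ===== SOURCE A (Python) =====
-- def process_action(generated_action, admissible_actions):
--     """matches LM generated action to all admissible actions
--         and outputs the best matching action"""
--
--     def editDistance(str1, str2, m, n):
--         # Create a table to store results of sub-problems
--         dp = [[0 for _ in range(n + 1)] for _ in range(m + 1)]
--
--         # Fill d[][] in bottom up manner
--         for i in range(m + 1):
--             for j in range(n + 1):
--
--                 # If first string is empty, only option is to
--                 # insert all characters of second string
--                 if i == 0:
--                     dp[i][j] = j  # Min. operations = j
--
--                 # If second string is empty, only option is to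
--                 # remove all characters of second string
--                 elif j == 0:
--                     dp[i][j] = i  # Min. operations = i
--
--                 # If last characters are same, ignore last char
--                 # and recur for remaining string
--                 elif str1[i - 1] == str2[j - 1]:
--                     dp[i][j] = dp[i - 1][j - 1]
--
--                 # If last character are different, consider all
--                 # possibilities and find minimum
--                 else:
--                     dp[i][j] = 1 + min(dp[i][j - 1],  # Insert
--                                        dp[i - 1][j],  # Remove
--                                        dp[i - 1][j - 1])  # Replace
--
--         return dp[m][n]
--
--     output_action = ''
--     min_edit_dist_action = 100
--     for action in admissible_actions:
--         dist = editDistance(str1=generated_action, str2=action,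
--                             m=len(generated_action), n=len(action))
--         if dist < min_edit_dist_action:
--             output_action = action
--             min_edit_dist_action = dist
--
--     return output_action
-- ===== SOURCE B (Python) =====
-- def process_action(generated_action, admissible_actions):
--     """matches LM generated action to all admissible actions
--         and outputs the best matching action"""
--
--     def editdist(str1, str2):
--         # top-down memoized recursion instead of a bottom-up table
--         memo = {}
--
--         def rec(i, j):
--             if (i, j) in memo:
--                 return memo[(i, j)]
--             if i == 0:
--                 v = j
--             elif j == 0:
--                 v = i
--             elif str1[i - 1] == str2[j - 1]:
--                 v = rec(i - 1, j - 1)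
--             else:
--                 v = 1 + min(rec(i - 1, j),      # Remove
--                             rec(i, j - 1),      # Insert
--                             rec(i - 1, j - 1))  # Replace
--             memo[(i, j)] = v
--             return v
--
--         return rec(len(str1), len(str2))
--
--     output_action = ''
--     min_edit_dist_action = 100
--     for action in admissible_actions:
--         dist = editdist(generated_action, action)
--         if dist < min_edit_dist_action:
--             output_action = action
--             min_edit_dist_action = dist
--     return output_action
-- ===== Notes on version B (the rewrite author's own statement) =====
-- stated objective: alternative
-- what changed: A's bottom-up (m+1)x(n+1) table-filling edit distance is replaced by a top-down memoized recursion rec(i,j) over suffix indices with a dict cache; the outer min-selection loop with its 100 cap and strict-< first-wins tie-break is kept.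
import Mathlib
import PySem

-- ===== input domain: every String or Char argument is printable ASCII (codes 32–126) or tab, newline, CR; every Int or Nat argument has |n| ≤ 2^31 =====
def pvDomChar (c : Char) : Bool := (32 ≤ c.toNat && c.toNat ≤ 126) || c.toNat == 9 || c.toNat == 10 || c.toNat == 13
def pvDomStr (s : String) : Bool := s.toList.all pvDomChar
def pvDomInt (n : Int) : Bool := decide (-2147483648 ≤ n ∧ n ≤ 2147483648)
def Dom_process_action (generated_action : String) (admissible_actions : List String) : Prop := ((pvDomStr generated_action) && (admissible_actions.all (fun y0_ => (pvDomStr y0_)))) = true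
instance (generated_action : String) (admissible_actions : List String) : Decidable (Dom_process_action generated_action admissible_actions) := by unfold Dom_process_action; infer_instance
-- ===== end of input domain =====

-- B replaces A's bottom-up (m+1)×(n+1) edit-distance table by a top-down memoized
-- recursion over suffix indices (dict cache); the outer min-selection loop is kept.

-- ===== PORT A =====
-- dp[i][j] read/write on the 2D table; all indices used by A are in range.
def tget (dp : List (List Int)) (i j : Nat) : Int := (dp.getD i []).getD j 0
def tset (dp : List (List Int)) (i j : Nat) (v : Int) : List (List Int) :=
  dp.set i ((dp.getD i []).set j v)

-- body of A's inner loop over j (branches in A's order)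
def innerBody (s1 s2 : List Char) (i : Nat) (dp : List (List Int)) (j : Nat) : List (List Int) :=
  let v : Int :=
    if i = 0 then (j : Int)
    else if j = 0 then (i : Int)
    else if s1.getD (i-1) ' ' = s2.getD (j-1) ' ' then tget dp (i-1) (j-1)
    else 1 + min (tget dp i (j-1)) (min (tget dp (i-1) j) (tget dp (i-1) (j-1)))
  tset dp i j v

-- body of A's outer loop over i
def outerBody (s1 s2 : List Char) (n : Nat) (dp : List (List Int)) (i : Nat) : List (List Int) :=
  (List.range (n+1)).foldl (innerBody s1 s2 i) dp

-- A's editDistance: build the zero table, fill it bottom-up, read dp[m][n]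
def editDistA (s1 s2 : List Char) (m n : Nat) : Int :=
  tget ((List.range (m+1)).foldl (outerBody s1 s2 n)
        (List.replicate (m+1) (List.replicate (n+1) (0 : Int)))) m n

def process_action (generated_action : String) (admissible_actions : List String) : String :=
  (admissible_actions.foldl
    (fun (st : String × Int) action =>
      let dist := editDistA generated_action.toList action.toList
                    generated_action.toList.length action.toList.length
      if dist < st.2 then (action, dist) else st)
    ("", 100)).1

-- ===== PORT B =====
-- B's rec(i, j): memo lookup first, then the branches in Source B's order, then store.
-- fuel is a totality guard only (recB is always called with fuel > i + j, so the 0 case is never reached).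
def recB (s1 s2 : List Char) (fuel : Nat) (i j : Nat) (memo : PySem.Dict (Nat × Nat) Int) :
    Int × PySem.Dict (Nat × Nat) Int :=
  match fuel with
  | 0 => (0, memo)
  | fuel+1 =>
    match memo.get? (i, j) with
    | some v => (v, memo)
    | none =>
      let p : Int × PySem.Dict (Nat × Nat) Int :=
        if i = 0 then ((j : Int), memo)
        else if j = 0 then ((i : Int), memo)
        else if s1.getD (i-1) ' ' = s2.getD (j-1) ' ' then recB s1 s2 fuel (i-1) (j-1) memo
        else
          let r1 := recB s1 s2 fuel (i-1) j memo          -- Remove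
          let r2 := recB s1 s2 fuel i (j-1) r1.2          -- Insert
          let r3 := recB s1 s2 fuel (i-1) (j-1) r2.2      -- Replace
          (1 + min r1.1 (min r2.1 r3.1), r3.2)
      (p.1, p.2.insert (i, j) p.1)

-- B's editdist: fresh memo, rec(len(str1), len(str2))
def editDistB (s1 s2 : List Char) : Int :=
  (recB s1 s2 (s1.length + s2.length + 1) s1.length s2.length PySem.Dict.empty).1

def process_action_alt (generated_action : String) (admissible_actions : List String) : String :=
  (admissible_actions.foldl
    (fun (st : String × Int) action =>
      let dist := editDistB generated_action.toList action.toList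
      if dist < st.2 then (action, dist) else st)
    ("", 100)).1

-- ===== PRECONDITION & SPEC =====
def Spec_process_action (generated_action : String) (admissible_actions : List String) (out : String) : Prop := out = process_action_alt generated_action admissible_actions
instance (generated_action : String) (admissible_actions : List String) (out : String) : Decidable (Spec_process_action generated_action admissible_actions out) := by unfold Spec_process_action; infer_instance

-- ===== CLAIM (what is proved, stated in full; the proofs are below) =====
def Claim_equal_process_action : Prop := ∀ (generated_action : String) (admissible_actions : List String), Dom_process_action generated_action admissible_actions → Spec_process_action generated_action admissible_actions (process_action generated_action admissible_actions)

-- ===== LEMMAS AND PROOFS =====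

-- the mathematical edit distance both programs compute
def ed (s1 s2 : List Char) : Nat → Nat → Int
  | 0, j => (j : Int)
  | i+1, 0 => ((i+1 : Nat) : Int)
  | i+1, j+1 =>
    if s1.getD i ' ' = s2.getD j ' ' then ed s1 s2 i j
    else 1 + min (ed s1 s2 (i+1) j) (min (ed s1 s2 i (j+1)) (ed s1 s2 i j))
termination_by i j => i + j
decreasing_by all_goals omega

-- ---- A-side: the table rows ----

-- the value recurrence of one new row: entry j of the row for character ca, given previous row prev
def fRow (ca : Char) (b : List Char) (prev : List Int) (i : Int) : Nat → Int
  | 0 => i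
  | j+1 =>
    if ca = b.getD j ' ' then prev.getD j 0
    else 1 + min (fRow ca b prev i j) (min (prev.getD (j+1) 0) (prev.getD j 0))

-- the sequence of rows A computes
def Rrow (s1 s2 : List Char) : Nat → List Int
  | 0 => (List.range (s2.length + 1)).map (fun j => (j : Int))
  | t+1 => (List.range (s2.length + 1)).map
             (fRow (s1.getD t ' ') s2 (Rrow s1 s2 t) ((t+1 : Nat) : Int))

lemma Rrow_length (s1 s2 : List Char) (t : Nat) : (Rrow s1 s2 t).length = s2.length + 1 := by
  cases t <;> simp [Rrow]

-- generic getD helpers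
lemma getD_set_self {α : Type} (l : List α) (a : Nat) (x d : α) (h : a < l.length) :
    (l.set a x).getD a d = x := by
  simp [List.getD, h]

lemma getD_set_ne {α : Type} (l : List α) (a b : Nat) (x : α) (d : α) (h : a ≠ b) :
    (l.set a x).getD b d = l.getD b d := by
  simp [List.getD, List.getElem?_set_ne h]

lemma getD_append_left {α : Type} (l1 l2 : List α) (t : Nat) (d : α) (h : t < l1.length) :
    (l1 ++ l2).getD t d = l1.getD t d := by
  simp [List.getD, List.getElem?_append_left h]

lemma getD_mapRange {α : Type} [Inhabited α] (f : Nat → α) (k t : Nat) (d : α) (h : t < k) :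
    ((List.range k).map f).getD t d = f t := by
  simp [List.getD, List.getElem?_map, List.getElem?_range h]

lemma inner_fill_zero (s1 s2 : List Char) (dp : List (List Int))
    (hdp : 0 < dp.length) (hrow : (dp.getD 0 []).length = s2.length + 1) :
    ∀ k, k ≤ s2.length →
      (List.range (k+1)).foldl (innerBody s1 s2 0) dp
        = dp.set 0 (((List.range (k+1)).map (fun j => (j : Int))) ++ (dp.getD 0 []).drop (k+1)) := by
  have hstep : ∀ (dpx : List (List Int)) (j : Nat),
      innerBody s1 s2 0 dpx j = tset dpx 0 j (j : Int) := by
    intro dpx j; simp [innerBody]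
  intro k
  induction k with
  | zero =>
    intro _
    obtain ⟨r, rs, hrr⟩ : ∃ r rs, dp.getD 0 [] = r :: rs := by
      cases hx : dp.getD 0 [] with
      | nil => rw [hx] at hrow; simp at hrow
      | cons a l => exact ⟨a, l, rfl⟩
    simp only [Nat.zero_add, List.range_one, List.foldl_cons, List.foldl_nil, hstep, tset]
    rw [hrr]
    rfl
  | succ k ih =>
    intro hk
    have IH := ih (by omega)
    rw [List.range_succ, List.foldl_append, IH, List.foldl_cons, List.foldl_nil, hstep]
    set R := ((List.range (k+1)).map (fun j => (j : Int))) ++ (dp.getD 0 []).drop (k+1) with hR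
    have hget : (dp.set 0 R).getD 0 [] = R := getD_set_self dp 0 R [] hdp
    simp only [tset, hget, List.set_set]
    congr 1
    have hk1 : k + 1 < (dp.getD 0 []).length := by omega
    have hdropc : (dp.getD 0 []).drop (k+1) = (dp.getD 0 [])[k+1] :: (dp.getD 0 []).drop (k+2) :=
      List.drop_eq_getElem_cons hk1
    have hlen1 : ((List.range (k+1)).map (fun j => (j : Int))).length = k + 1 := by simp
    rw [hR, hdropc, List.set_append_right _ _ (by simp)]
    simp [List.map_append, List.append_assoc]
    have hk1' : k + 1 < (dp[0]?.getD ([] : List Int)).length := hk1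
    rw [List.drop_eq_getElem_cons hk1', List.set_cons_zero]

lemma inner_fill (s1 s2 : List Char) (i' : Nat) (dp : List (List Int))
    (hdp : i' + 1 < dp.length)
    (hprev : (dp.getD i' []).length = s2.length + 1)
    (hrow : (dp.getD (i'+1) []).length = s2.length + 1) :
    ∀ k, k ≤ s2.length →
      (List.range (k+1)).foldl (innerBody s1 s2 (i'+1)) dp
        = dp.set (i'+1)
            (((List.range (k+1)).map (fRow (s1.getD i' ' ') s2 (dp.getD i' []) ((i'+1 : Nat) : Int)))
              ++ (dp.getD (i'+1) []).drop (k+1)) := by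
  set ca := s1.getD i' ' ' with hca
  set prev := dp.getD i' [] with hprevdef
  set f := fRow ca s2 prev ((i'+1 : Nat) : Int) with hfdef
  intro k
  induction k with
  | zero =>
    intro _
    obtain ⟨r, rs, hrr⟩ : ∃ r rs, dp.getD (i'+1) [] = r :: rs := by
      cases hx : dp.getD (i'+1) [] with
      | nil => rw [hx] at hrow; simp at hrow
      | cons a l => exact ⟨a, l, rfl⟩
    have hstep0 : innerBody s1 s2 (i'+1) dp 0 = tset dp (i'+1) 0 ((i'+1 : Nat) : Int) := by
      simp [innerBody]
    simp only [Nat.zero_add, List.range_one, List.foldl_cons, List.foldl_nil, hstep0, tset]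
    rw [hrr]
    rfl
  | succ k ih =>
    intro hk
    have IH := ih (by omega)
    rw [List.range_succ, List.foldl_append, IH, List.foldl_cons, List.foldl_nil]
    set R := ((List.range (k+1)).map f) ++ (dp.getD (i'+1) []).drop (k+1) with hR
    have hlen1 : ((List.range (k+1)).map f).length = k + 1 := by simp
    have hget : (dp.set (i'+1) R).getD (i'+1) [] = R := getD_set_self dp (i'+1) R [] hdp
    have hgetprev : (dp.set (i'+1) R).getD i' [] = prev := by
      rw [hprevdef]
      exact getD_set_ne dp (i'+1) i' R [] (by omega)
    have htg1 : tget (dp.set (i'+1) R) (i'+1) k = f k := by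
      unfold tget
      rw [hget, hR, getD_append_left _ _ _ _ (by simp), getD_mapRange _ _ _ _ (by omega)]
    have htg2 : tget (dp.set (i'+1) R) i' (k+1) = prev.getD (k+1) 0 := by
      unfold tget; rw [hgetprev]
    have htg3 : tget (dp.set (i'+1) R) i' k = prev.getD k 0 := by
      unfold tget; rw [hgetprev]
    have hv : innerBody s1 s2 (i'+1) (dp.set (i'+1) R) (k+1)
        = tset (dp.set (i'+1) R) (i'+1) (k+1) (f (k+1)) := by
      unfold innerBody
      rw [if_neg (Nat.succ_ne_zero i'), if_neg (Nat.succ_ne_zero k)]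
      have : i' + 1 - 1 = i' := by omega
      rw [this]
      have : k + 1 - 1 = k := by omega
      rw [this, htg1, htg2, htg3]
      rw [hfdef]
      rw [show fRow ca s2 prev ((i'+1 : Nat) : Int) (k+1)
            = if ca = s2.getD k ' ' then prev.getD k 0
              else 1 + min (fRow ca s2 prev ((i'+1 : Nat) : Int) k)
                    (min (prev.getD (k+1) 0) (prev.getD k 0)) from rfl]
    rw [hv]
    simp only [tset, hget, List.set_set]
    congr 1
    have hk1 : k + 1 < (dp.getD (i'+1) []).length := by omega
    have hdropc : (dp.getD (i'+1) []).drop (k+1)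
        = (dp.getD (i'+1) [])[k+1] :: (dp.getD (i'+1) []).drop (k+2) :=
      List.drop_eq_getElem_cons hk1
    rw [hR, hdropc, List.set_append_right _ _ (by simp)]
    simp only [hlen1, Nat.sub_self, List.set_cons_zero]
    rw [List.map_append]
    simp [List.append_assoc]

lemma getD_append_at_length {α : Type} (l1 l2 : List α) (d : α) :
    (l1 ++ l2).getD l1.length d = l2.getD 0 d := by
  simp [List.getD, List.getElem?_append_right (Nat.le_refl l1.length)]

lemma outer_fill (s1 s2 : List Char) :
    ∀ t, t ≤ s1.length →
      (List.range (t+1)).foldl (outerBody s1 s2 s2.length)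
          (List.replicate (s1.length+1) (List.replicate (s2.length+1) (0 : Int)))
        = (List.range (t+1)).map (Rrow s1 s2)
            ++ List.replicate (s1.length - t) (List.replicate (s2.length+1) (0 : Int)) := by
  set zrow : List Int := List.replicate (s2.length+1) (0 : Int) with hz
  set dp0 : List (List Int) := List.replicate (s1.length+1) zrow with hdp0
  have hzlen : zrow.length = s2.length + 1 := by simp [hz]
  intro t
  induction t with
  | zero =>
    intro _
    have hdp : 0 < dp0.length := by simp [hdp0]
    have hrow0 : dp0.getD 0 [] = zrow := by
      rw [hdp0]
      simp [List.getD]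
    simp only [Nat.zero_add, List.range_one, List.foldl_cons, List.foldl_nil, outerBody]
    rw [inner_fill_zero s1 s2 dp0 hdp (by rw [hrow0, hzlen]) s2.length (Nat.le_refl _)]
    rw [hrow0, show zrow.drop (s2.length+1) = [] from by simp [hz], List.append_nil]
    rw [hdp0, List.replicate_succ, List.set_cons_zero]
    simp [Rrow]
  | succ t ih =>
    intro ht
    have IH := ih (by omega)
    rw [List.range_succ, List.foldl_append, IH, List.foldl_cons, List.foldl_nil]
    set L1 := (List.range (t+1)).map (Rrow s1 s2) with hL1
    have hL1len : L1.length = t + 1 := by simp [hL1]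
    have hmt : s1.length - t = (s1.length - (t+1)) + 1 := by omega
    set D := L1 ++ List.replicate (s1.length - t) zrow with hD
    have hDlen : D.length = s1.length + 1 := by
      simp [hD, hL1len]
      omega
    have hgt : D.getD t [] = Rrow s1 s2 t := by
      rw [hD, getD_append_left _ _ _ _ (by rw [hL1len]; omega), hL1,
          getD_mapRange _ _ _ _ (by omega)]
    have hgt1 : D.getD (t+1) [] = zrow := by
      rw [hD, ← hL1len, getD_append_at_length, hmt, List.replicate_succ]
      rfl
    rw [outerBody]
    rw [inner_fill s1 s2 t D (by omega) (by rw [hgt, Rrow_length]) (by rw [hgt1, hzlen])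
        s2.length (Nat.le_refl _)]
    rw [hgt, hgt1, show zrow.drop (s2.length+1) = [] from by simp [hz], List.append_nil]
    rw [hD, hmt, List.replicate_succ, List.set_append_right _ _ (by omega : L1.length ≤ t+1)]
    have h0 : t + 1 - L1.length = 0 := by omega
    rw [h0, List.set_cons_zero]
    have hhead : List.map (fRow (s1.getD t ' ') s2 (Rrow s1 s2 t) ((t+1 : Nat) : Int))
        (List.range (s2.length+1)) = Rrow s1 s2 (t+1) := by simp [Rrow]
    rw [hhead, List.map_append, ← hL1]
    simp

lemma editDistA_eq_Rrow (s1 s2 : List Char) :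
    editDistA s1 s2 s1.length s2.length = (Rrow s1 s2 s1.length).getD s2.length 0 := by
  unfold editDistA
  rw [outer_fill s1 s2 s1.length (Nat.le_refl _), Nat.sub_self]
  unfold tget
  rw [List.replicate_zero, List.append_nil, getD_mapRange _ _ _ _ (by omega)]

-- A's rows compute ed
lemma fRow_eq_ed (s1 s2 : List Char) (t : Nat) (prev : List Int)
    (hprev : ∀ j, j ≤ s2.length → prev.getD j 0 = ed s1 s2 t j) :
    ∀ j, j ≤ s2.length → fRow (s1.getD t ' ') s2 prev ((t+1 : Nat) : Int) j = ed s1 s2 (t+1) j := by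
  intro j
  induction j with
  | zero => intro _; simp [fRow, ed]
  | succ j ih =>
    intro hj
    rw [fRow, ed]
    rw [hprev j (by omega), hprev (j+1) (by omega), ih (by omega)]

lemma Rrow_getD_eq_ed (s1 s2 : List Char) :
    ∀ t j, j ≤ s2.length → (Rrow s1 s2 t).getD j 0 = ed s1 s2 t j := by
  intro t
  induction t with
  | zero =>
    intro j hj
    have haux : ∀ l : List Nat,
        List.flatMap (fun a => [Int.ofNat a]) l = List.map (fun a => Int.ofNat a) l := by
      intro l
      induction l with
      | nil => rfl
      | cons x xs ih => rw [List.flatMap_cons, List.map_cons, ih]; rfl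
    have hR : Rrow s1 s2 0 = (List.range (s2.length + 1)).map (fun a => Int.ofNat a) := by
      simp [Rrow]
      exact haux _
    rw [hR, getD_mapRange _ _ _ _ (by omega)]
    cases j <;> simp [ed]
  | succ t ih =>
    intro j hj
    rw [Rrow, getD_mapRange _ _ _ _ (by omega)]
    exact fRow_eq_ed s1 s2 t (Rrow s1 s2 t) (fun j' hj' => ih j' hj') j hj

lemma editDistA_eq_ed (s1 s2 : List Char) :
    editDistA s1 s2 s1.length s2.length = ed s1 s2 s1.length s2.length := by
  rw [editDistA_eq_Rrow, Rrow_getD_eq_ed s1 s2 s1.length s2.length (Nat.le_refl _)]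

-- ---- B-side: memoized recursion computes ed ----

-- memo invariant: every cached value is the edit distance of its indices
def MemoOK (s1 s2 : List Char) (m : PySem.Dict (Nat × Nat) Int) : Prop :=
  ∀ i j v, m.get? (i, j) = some v → v = ed s1 s2 i j

lemma memoOK_empty (s1 s2 : List Char) : MemoOK s1 s2 PySem.Dict.empty := by
  intro i j v h
  simp [PySem.Dict.get?_empty] at h

lemma memoOK_insert (s1 s2 : List Char) (m : PySem.Dict (Nat × Nat) Int) (i j : Nat)
    (hm : MemoOK s1 s2 m) (v : Int) (hval : v = ed s1 s2 i j) :
    MemoOK s1 s2 (m.insert (i, j) v) := by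
  intro i' j' w h
  rw [PySem.Dict.get?_insert] at h
  by_cases he : ((i', j') : Nat × Nat) = (i, j)
  · rw [if_pos he] at h
    cases h
    cases he
    exact hval
  · rw [if_neg he] at h
    exact hm i' j' w h

lemma recB_correct (s1 s2 : List Char) :
    ∀ (fuel : Nat), ∀ i j (memo : PySem.Dict (Nat × Nat) Int), i + j < fuel → MemoOK s1 s2 memo →
      (recB s1 s2 fuel i j memo).1 = ed s1 s2 i j ∧ MemoOK s1 s2 (recB s1 s2 fuel i j memo).2 := by
  intro fuel
  induction fuel with
  | zero => intro i j memo hn; omega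
  | succ n ihn =>
    intro i j memo hn hm
    rw [recB]
    cases hx : memo.get? ((i, j) : Nat × Nat) with
    | some v =>
      exact ⟨hm i j v hx, hm⟩
    | none =>
      simp only
      by_cases h1 : i = 0
      · subst h1
        refine ⟨by simp [ed.eq_def], ?_⟩
        exact memoOK_insert s1 s2 memo 0 j hm _ (by cases j <;> simp [ed])
      · by_cases h2 : j = 0
        · subst h2
          simp only [if_neg h1]
          obtain ⟨i', rfl⟩ : ∃ i', i = i' + 1 := ⟨i - 1, by omega⟩
          refine ⟨by simp [ed], ?_⟩
          exact memoOK_insert s1 s2 memo (i'+1) 0 hm _ (by simp [ed])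
        · obtain ⟨i', rfl⟩ : ∃ i', i = i' + 1 := ⟨i - 1, by omega⟩
          obtain ⟨j', rfl⟩ : ∃ j', j = j' + 1 := ⟨j - 1, by omega⟩
          simp only [if_neg h1, if_neg h2, Nat.add_sub_cancel]
          by_cases hc : s1.getD i' ' ' = s2.getD j' ' '
          · rw [if_pos hc]
            obtain ⟨hval, hmm⟩ := ihn i' j' memo (by omega) hm
            constructor
            · simp only [hval, ed, if_pos hc]
            · exact memoOK_insert s1 s2 _ (i'+1) (j'+1) hmm _
                (by simp only [hval, ed, if_pos hc])
          · rw [if_neg hc]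
            obtain ⟨hv1, hm1⟩ := ihn i' (j'+1) memo (by omega) hm
            obtain ⟨hv2, hm2⟩ := ihn (i'+1) j' (recB s1 s2 n i' (j'+1) memo).2 (by omega) hm1
            obtain ⟨hv3, hm3⟩ := ihn i' j' (recB s1 s2 n (i'+1) j' (recB s1 s2 n i' (j'+1) memo).2).2
              (by omega) hm2
            have hval : 1 + min (recB s1 s2 n i' (j'+1) memo).1
                ((min (recB s1 s2 n (i'+1) j' (recB s1 s2 n i' (j'+1) memo).2).1
                  (recB s1 s2 n i' j' (recB s1 s2 n (i'+1) j' (recB s1 s2 n i' (j'+1) memo).2).2).1))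
                = ed s1 s2 (i'+1) (j'+1) := by
              rw [hv1, hv2, hv3, ed, if_neg hc]
              omega
            exact ⟨hval, memoOK_insert s1 s2 _ (i'+1) (j'+1) hm3 _ hval⟩

lemma editDistB_eq_ed (s1 s2 : List Char) :
    editDistB s1 s2 = ed s1 s2 s1.length s2.length := by
  unfold editDistB
  exact (recB_correct s1 s2 (s1.length + s2.length + 1) s1.length s2.length PySem.Dict.empty
    (by omega) (memoOK_empty s1 s2)).1

lemma dist_eq (s1 s2 : List Char) :
    editDistA s1 s2 s1.length s2.length = editDistB s1 s2 := by
  rw [editDistA_eq_ed, editDistB_eq_ed]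

-- ===== VERDICT (by name: the statement is the Claim_ definition above) =====
theorem process_action_spec : Claim_equal_process_action := by
  intro g acts _
  show process_action g acts = process_action_alt g acts
  unfold process_action process_action_alt
  have h : (fun (st : String × Int) action =>
      let dist := editDistA g.toList action.toList g.toList.length action.toList.length
      if dist < st.2 then (action, dist) else st)
    = (fun (st : String × Int) action =>
      let dist := editDistB g.toList action.toList
      if dist < st.2 then (action, dist) else st) := by
    funext st action
    simp only [dist_eq]
  rw [h]
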